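-- pv_equiv track=rewrite | github.com/Muzzh/Codefights | TheCore/SpringOfIntegration/CyclicString.py | cyclicString
-- ===== SOURCE A (Python) =====
-- def cyclicString(s):
--     S = list(s)
--     for i in range(1, len(s)):
--         yes = 0
--         a = list(s[:i])
--         for j in range(len(S)):
--             if S[j] in a:
--                 yes += 1
--         if yes == len(S):
--             return len(s[:i])
-- ===== SOURCE B (Python) =====
-- def cyclicString(s):
--     seen = set()
--     m = 0
--     for i, c in enumerate(s):
--         if c not in seen:
--             seen.add(c)
--             m = i + 1
--     return m if 0 < m < len(s) else None
-- ===== Notes on version B (the rewrite author's own statement) =====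
-- stated objective: faster
-- what changed: Replaces A's scan over every candidate prefix (rebuilding the prefix and re-counting membership of all n characters for each i) by a single left-to-right pass that keeps a seen-set and records the position just after the last first occurrence of a character; that position is the answer when it is a proper prefix length.
import Mathlib
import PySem

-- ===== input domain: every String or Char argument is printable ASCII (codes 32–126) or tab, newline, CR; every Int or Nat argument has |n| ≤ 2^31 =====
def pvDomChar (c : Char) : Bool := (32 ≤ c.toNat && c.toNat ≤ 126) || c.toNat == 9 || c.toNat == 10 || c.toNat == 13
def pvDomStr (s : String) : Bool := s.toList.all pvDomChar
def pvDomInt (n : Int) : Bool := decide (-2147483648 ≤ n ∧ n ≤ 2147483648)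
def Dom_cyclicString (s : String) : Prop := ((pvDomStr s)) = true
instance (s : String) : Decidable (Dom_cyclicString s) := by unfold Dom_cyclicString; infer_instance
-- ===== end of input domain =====

-- B replaces A's quadratic scan for every candidate prefix by a single pass that records
-- the position after the last first-occurrence of a character (objective: faster, asymptotic).

-- ===== PORT A =====
-- for i in range(1, len(s)): count chars of S contained in s[:i]; return len(s[:i]) on full count
def pvAGo (S : List Char) : List Int → Option Int
  | [] => none
  | i :: rest =>
      let a := PySem.List.slice S none (some i)        -- a = list(s[:i])
      -- for j in range(len(S)): if S[j] in a: yes += 1   (j runs over all valid indices, so this folds over S's elements)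
      let yes := S.foldl (fun acc c => if c ∈ a then acc + 1 else acc) 0
      if yes = S.length then some ((a.length : Int))   -- return len(s[:i])
      else pvAGo S rest

def cyclicString (s : String) : Option Int :=
  let S := s.toList
  pvAGo S (PySem.List.pyRange 1 (S.length : Int) 1)

-- ===== PORT B =====
def cyclicString_alt (s : String) : Option Int :=
  let L := s.toList
  let r := (PySem.List.enumerate L 0).foldl
      (fun (st : PySem.Set Char × Int) ic =>
        if ic.2 ∈ st.1 then st else (PySem.Set.add st.1 ic.2, ic.1 + 1))
      (PySem.Set.empty, 0)
  if 0 < r.2 ∧ r.2 < (L.length : Int) then some r.2 else none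

-- ===== PRECONDITION & SPEC =====
def Spec_cyclicString (s : String) (out : Option Int) : Prop := out = cyclicString_alt s
instance (s : String) (out : Option Int) : Decidable (Spec_cyclicString s out) := by unfold Spec_cyclicString; infer_instance

-- ===== CLAIM (what is proved, stated in full; the proofs are below) =====
def Claim_equal_cyclicString : Prop := ∀ (s : String), Dom_cyclicString s → Spec_cyclicString s (cyclicString s)

-- ===== LEMMAS AND PROOFS =====

-- "every character of L occurs in the first i characters"
def pvQ (L : List Char) (i : Nat) : Prop := ∀ c ∈ L, c ∈ L.take i

theorem pvTake_subset_take {α : Type} (L : List α) {j i : Nat} (h : j ≤ i) :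
    L.take j ⊆ L.take i := by
  have : L.take j = (L.take i).take j := by
    rw [List.take_take, Nat.min_eq_left h]
  rw [this]
  exact List.take_subset _ _

theorem pvFoldl_count (a : List Char) : ∀ (S : List Char) (k : Nat),
    S.foldl (fun acc c => if c ∈ a then acc + 1 else acc) k
      = k + S.countP (fun c => decide (c ∈ a))
  | [], k => by simp
  | c :: S, k => by
    by_cases h : c ∈ a <;>
      simp [h, pvFoldl_count a S]; omega

theorem pvYes_iff (S : List Char) (a : List Char) :
    (S.foldl (fun acc c => if c ∈ a then acc + 1 else acc) 0 = S.length)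
      ↔ ∀ c ∈ S, c ∈ a := by
  rw [pvFoldl_count a S 0, Nat.zero_add, List.countP_eq_length]
  simp

-- A's loop finds the first i in [lo, |S|) whose prefix contains all characters;
-- with pvQ characterised by a threshold M this is max M lo when it is < |S|.
theorem pvAGo_spec (S : List Char) (M : Nat) (hQ : ∀ i : Nat, pvQ S i ↔ M ≤ i) :
    ∀ lo : Nat, pvAGo S (PySem.List.pyRange (lo : Int) (S.length : Int) 1)
      = if max M lo < S.length then some ((max M lo : Nat) : Int) else none := by
  intro lo
  by_cases hlt : lo < S.length
  · rw [PySem.List.pyRange_one_cons (by exact_mod_cast hlt)]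
    have hslice : PySem.List.slice S none (some (lo : Int)) = S.take lo :=
      PySem.List.slice_to_natCast S lo
    unfold pvAGo
    simp only [hslice]
    by_cases hcond : (S.foldl (fun acc c => if c ∈ S.take lo then acc + 1 else acc) 0 = S.length)
    · have hq : pvQ S lo := (pvYes_iff S (S.take lo)).mp hcond
      have hM : M ≤ lo := (hQ lo).mp hq
      rw [if_pos hcond]
      have : max M lo = lo := Nat.max_eq_right hM
      rw [this, if_pos hlt]
      have : (S.take lo).length = lo := by
        simp [List.length_take, Nat.min_eq_left (Nat.le_of_lt hlt)]
      rw [this]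
    · have hq : ¬ pvQ S lo := fun h => hcond ((pvYes_iff S (S.take lo)).mpr h)
      have hM : lo < M := by
        by_contra h
        exact hq ((hQ lo).mpr (by omega))
      rw [if_neg hcond]
      have hcast : ((lo : Int) + 1) = ((lo + 1 : Nat) : Int) := by push_cast; ring
      rw [hcast, pvAGo_spec S M hQ (lo + 1)]
      have h1 : max M lo = M := Nat.max_eq_left (Nat.le_of_lt hM)
      have h2 : max M (lo + 1) = M := Nat.max_eq_left hM
      rw [h1, h2]
  · rw [PySem.List.pyRange_one_eq_nil (by exact_mod_cast Nat.le_of_not_lt hlt)]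
    have : ¬ max M lo < S.length := by
      have := Nat.le_of_not_lt hlt
      omega
    rw [if_neg this]
    rfl
termination_by lo => S.length - lo
decreasing_by omega

-- B's fold invariant: after the processed prefix p, the set holds set(p) and m is the
-- threshold of pvQ on p; processing the rest t preserves this shape for p ++ t.
theorem pvBGo_inv : ∀ (t p : List Char) (m : Nat), m ≤ p.length →
    (∀ i : Nat, pvQ p i ↔ m ≤ i) →
    ∃ M : Nat,
      (PySem.List.enumerate t (p.length : Int)).foldl
        (fun (st : PySem.Set Char × Int) ic =>
          if ic.2 ∈ st.1 then st else (PySem.Set.add st.1 ic.2, ic.1 + 1))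
        (PySem.Set.ofList p, (m : Int))
        = (PySem.Set.ofList (p ++ t), ((M : Nat) : Int))
      ∧ M ≤ (p ++ t).length ∧ (∀ i : Nat, pvQ (p ++ t) i ↔ M ≤ i)
  | [], p, m, hm, hQ => ⟨m, by simp, by simpa using hm, by simpa using hQ⟩
  | c :: t, p, m, hm, hQ => by
    rw [PySem.List.enumerate_cons]
    simp only [List.foldl_cons]
    by_cases hc : c ∈ p
    · have hmem : c ∈ PySem.Set.ofList p := (PySem.Set.mem_ofList _ _).mpr hc
      rw [if_pos hmem]
      have hset : PySem.Set.ofList p = PySem.Set.ofList (p ++ [c]) := by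
        rw [PySem.Set.ofList_append_singleton, PySem.Set.add_of_mem hmem]
      have hQ' : ∀ i : Nat, pvQ (p ++ [c]) i ↔ m ≤ i := by
        intro i
        constructor
        · intro h
          by_cases hi : i ≤ p.length
          · apply (hQ i).mp
            intro c' hc'
            have := h c' (List.mem_append_left _ hc')
            rwa [List.take_append_of_le_length hi] at this
          · omega
        · intro hmi
          intro c' hc'
          have hc'p : c' ∈ p := by
            rcases List.mem_append.mp hc' with h | h
            · exact h
            · simp at h; subst h; exact hc
          have : c' ∈ p.take m := (hQ m).mpr le_rfl c' hc'p
          have h1 : p.take m = (p ++ [c]).take m :=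
            (List.take_append_of_le_length hm).symm
          rw [h1] at this
          exact pvTake_subset_take (p ++ [c]) hmi this
      have hlen : ((p.length : Int) + 1) = (((p ++ [c]).length : Nat) : Int) := by
        simp
      obtain ⟨M, h1, h2, h3⟩ := pvBGo_inv t (p ++ [c]) m (by simp; omega) hQ'
      refine ⟨M, ?_, by simpa using h2, by simpa using h3⟩
      rw [hset]
      rw [← hlen] at h1
      push_cast at h1
      simpa using h1
    · have hmem : c ∉ PySem.Set.ofList p := fun h => hc ((PySem.Set.mem_ofList _ _).mp h)
      rw [if_neg hmem]
      have hset : PySem.Set.add (PySem.Set.ofList p) c = PySem.Set.ofList (p ++ [c]) :=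
        (PySem.Set.ofList_append_singleton ..).symm
      have hQ' : ∀ i : Nat, pvQ (p ++ [c]) i ↔ p.length + 1 ≤ i := by
        intro i
        constructor
        · intro h
          by_contra hi
          have hi' : i ≤ p.length := by omega
          have := h c (List.mem_append_right _ (by simp))
          rw [List.take_append_of_le_length hi'] at this
          exact hc (List.take_subset _ _ this)
        · intro hi
          have : (p ++ [c]).take i = p ++ [c] :=
            List.take_of_length_le (by simp; omega)
          rw [pvQ, this]
          intro c' hc'; exact hc'
      have hlen : ((p.length : Int) + 1) = (((p ++ [c]).length : Nat) : Int) := by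
        simp
      obtain ⟨M, h1, h2, h3⟩ := pvBGo_inv t (p ++ [c]) (p.length + 1) (by simp) hQ'
      refine ⟨M, ?_, by simpa using h2, by simpa using h3⟩
      rw [hset]
      rw [← hlen] at h1
      push_cast at h1 ⊢
      simpa using h1

theorem pvQ_zero_false {c : Char} {L : List Char} : ¬ pvQ (c :: L) 0 := by
  intro h
  simpa using h c (List.mem_cons_self ..)

-- ===== VERDICT (by name: the statement is the Claim_ definition above) =====
theorem cyclicString_spec : Claim_equal_cyclicString := by
  intro s _
  unfold Spec_cyclicString cyclicString cyclicString_alt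
  simp only []
  obtain ⟨M, h1, h2, h3⟩ := pvBGo_inv s.toList [] 0 (by simp) (by
    intro i
    constructor
    · intro _; omega
    · intro _ c hc; simp at hc)
  simp only [List.nil_append, List.length_nil, Nat.cast_zero] at h1 h2 h3
  have hA := pvAGo_spec s.toList M h3 1
  rw [Nat.cast_one] at hA
  rw [hA]
  have hr2 : (List.foldl
      (fun (st : PySem.Set Char × Int) ic =>
        if ic.2 ∈ st.1 then st else (PySem.Set.add st.1 ic.2, ic.1 + 1))
      ((PySem.Set.empty : PySem.Set Char), (0 : Int))
      (PySem.List.enumerate s.toList 0)).2 = (M : Int) := by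
    rw [show (PySem.Set.empty : PySem.Set Char) = PySem.Set.ofList [] from rfl, h1]
  rw [hr2]
  by_cases hn : s.toList = []
  · rw [hn] at h2 ⊢
    simp at h2
    subst h2
    simp
  · have hn1 : 1 ≤ s.toList.length := by
      cases h : s.toList with
      | nil => exact absurd h hn
      | cons a t => simp [h]
    have hM1 : 1 ≤ M := by
      by_contra h
      cases hL : s.toList with
      | nil => exact hn hL
      | cons c t =>
        rw [hL] at h3
        exact pvQ_zero_false ((h3 0).mpr (by omega))
    have hmax : max M 1 = M := Nat.max_eq_left hM1
    rw [hmax]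
    by_cases hlt : M < s.toList.length
    · rw [if_pos hlt, if_pos (by constructor <;> [exact_mod_cast hM1; exact_mod_cast hlt])]
    · rw [if_neg hlt, if_neg (by
        intro hb
        exact hlt (by exact_mod_cast hb.2))]
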